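-- pv_equiv track=rewrite | github.com/WXW322/backend | Reverse_Tool/common/Converter/MessageConvert.py | clsMsgsByRegix
-- ===== SOURCE A (Python) =====
-- def clsMsgsByRegix(regixS, wLen, messages):
--     splitDatas = {}
--     for message in messages:
--         rightData = message[0:wLen]
--         for regix in regixS:
--             if rightData.find(regix) != -1:
--                 if regix not in splitDatas:
--                     splitDatas[regix] = []
--                 splitDatas[regix].append(message)
--                 lo = True
--     return splitDatas
-- ===== SOURCE B (Python) =====
-- def clsMsgsByRegix(regixS, wLen, messages):
--     # Flatten-then-group: materialise the flat list of (pattern, message) hits,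
--     # fix the key order, then gather each group with one comprehension.
--     hits = [(r, m) for m in messages for r in regixS if r in m[:wLen]]
--     order = dict.fromkeys(r for r, _ in hits)
--     return {r: [m for r2, m in hits if r2 == r] for r in order}
-- ===== Notes on version B (the rewrite author's own statement) =====
-- stated objective: alternative
-- what changed: A builds the dict incrementally inside two nested loops, testing key presence and appending at every hit; B first materialises the flat list of (pattern, message) hits, then fixes the key order by ordered dedup, then gathers each group from the hit list with one comprehension.
import Mathlib
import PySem

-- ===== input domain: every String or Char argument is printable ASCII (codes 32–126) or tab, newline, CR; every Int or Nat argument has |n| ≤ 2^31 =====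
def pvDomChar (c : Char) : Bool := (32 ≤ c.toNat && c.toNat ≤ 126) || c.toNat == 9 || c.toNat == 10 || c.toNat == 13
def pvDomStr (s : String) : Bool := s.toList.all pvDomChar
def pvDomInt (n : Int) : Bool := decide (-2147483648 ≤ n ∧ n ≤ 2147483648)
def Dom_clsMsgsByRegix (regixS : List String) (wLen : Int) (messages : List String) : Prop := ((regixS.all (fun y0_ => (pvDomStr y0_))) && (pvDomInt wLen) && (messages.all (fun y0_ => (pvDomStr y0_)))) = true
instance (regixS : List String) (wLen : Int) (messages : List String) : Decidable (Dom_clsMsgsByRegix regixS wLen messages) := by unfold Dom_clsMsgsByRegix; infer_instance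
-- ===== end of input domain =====

-- B replaces A's incremental dict building inside two nested loops by a
-- flatten-then-group pass (flat hit list, ordered dedup of keys, one gather per
-- key): alternative structure, similar cost; return values proved equal everywhere.

-- ===== PORT A =====
-- A's inner-loop body: one pattern `regix` against the prefix `p` of message `m`
def pvStep (p : String) (m : String) (splitDatas : PySem.Dict String (List String)) (regix : String) : PySem.Dict String (List String) :=
  if PySem.Str.find p regix ≠ -1 then
    let splitDatas := if splitDatas.contains regix then splitDatas else splitDatas.insert regix []
    splitDatas.modify regix [] (fun l => l ++ [m])      -- splitDatas[regix].append(message)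
  else splitDatas

def clsMsgsByRegix (regixS : List String) (wLen : Int) (messages : List String) : List (String × List String) :=
  (messages.foldl (fun splitDatas message =>
      regixS.foldl (pvStep (PySem.Str.slice message (some 0) (some wLen)) message) splitDatas)
    (PySem.Dict.empty : PySem.Dict String (List String))).items

-- ===== PORT B =====
def clsMsgsByRegix_alt (regixS : List String) (wLen : Int) (messages : List String) : List (String × List String) :=
  let hits := messages.flatMap (fun m =>
    (regixS.filter (fun r => PySem.Str.isIn r (PySem.Str.slice m (some 0) (some wLen)))).map (fun r => (r, m)))
  let order := PySem.List.dedup (hits.map Prod.fst)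
  order.map (fun r => (r, (hits.filter (fun rm => rm.1 == r)).map Prod.snd))

-- ===== PRECONDITION & SPEC =====
def Spec_clsMsgsByRegix (regixS : List String) (wLen : Int) (messages : List String) (out : List (String × List String)) : Prop := out = clsMsgsByRegix_alt regixS wLen messages
instance (regixS : List String) (wLen : Int) (messages : List String) (out : List (String × List String)) : Decidable (Spec_clsMsgsByRegix regixS wLen messages out) := by unfold Spec_clsMsgsByRegix; infer_instance

-- ===== CLAIM (what is proved, stated in full; the proofs are below) =====
def Claim_equal_clsMsgsByRegix : Prop := ∀ (regixS : List String) (wLen : Int) (messages : List String), Dom_clsMsgsByRegix regixS wLen messages → Spec_clsMsgsByRegix regixS wLen messages (clsMsgsByRegix regixS wLen messages)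

-- ===== LEMMAS AND PROOFS =====

lemma pvFind_ne (p r : String) : (PySem.Str.find p r ≠ -1) ↔ PySem.Str.isIn r p = true := by
  rw [PySem.Str.find_ne_neg_one_iff, PySem.Str.isIn_iff_infix]

lemma pvStep_keys (p m : String) (d : PySem.Dict String (List String)) (r : String) :
    (pvStep p m d r).keys = if PySem.Str.isIn r p then PySem.Set.add d.keys r else d.keys := by
  unfold pvStep
  by_cases h : PySem.Str.isIn r p = true
  · rw [if_pos ((pvFind_ne p r).mpr h), if_pos h, PySem.Dict.keys_modify]
    by_cases hc : d.contains r = true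
    · rw [if_pos hc, PySem.Dict.keys_insert_of_contains _ _ hc,
        PySem.Set.add_of_mem ((PySem.Dict.contains_iff_mem_keys d r).mp hc)]
    · rw [if_neg hc]
      rw [PySem.Dict.keys_insert_of_contains _ _ (PySem.Dict.contains_insert_self d r []),
        PySem.Dict.keys_insert_of_not_contains _ _ (by simpa using hc),
        PySem.Set.add_of_not_mem (fun hm => hc ((PySem.Dict.contains_iff_mem_keys d r).mpr hm))]
  · rw [if_neg (fun hf => h ((pvFind_ne p r).mp hf)), if_neg h]

lemma pvStep_getD (p m : String) (d : PySem.Dict String (List String)) (r r' : String) :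
    (pvStep p m d r').getD r [] =
      if PySem.Str.isIn r' p ∧ r = r' then d.getD r [] ++ [m] else d.getD r [] := by
  unfold pvStep
  by_cases h : PySem.Str.isIn r' p = true
  · rw [if_pos ((pvFind_ne p r').mpr h)]
    by_cases hc : d.contains r' = true
    · rw [if_pos hc]
      by_cases he : r = r'
      · subst he
        rw [PySem.Dict.getD_modify_self, if_pos (And.intro h rfl)]
      · rw [PySem.Dict.getD_modify_of_ne _ _ _ he, if_neg (fun hx => he hx.2)]
    · rw [if_neg hc]
      by_cases he : r = r'
      · subst he
        rw [PySem.Dict.getD_modify_self, PySem.Dict.getD_insert_self,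
          PySem.Dict.getD_of_not_contains d [] (by simpa using hc), if_pos (And.intro h rfl)]
      · rw [PySem.Dict.getD_modify_of_ne _ _ _ he, PySem.Dict.getD_insert_of_ne _ _ _ he,
          if_neg (fun hx => he hx.2)]
  · rw [if_neg (fun hf => h ((pvFind_ne p r').mp hf)), if_neg (fun hx => h hx.1)]

lemma pvInner_keys (rs : List String) (p m : String) (d : PySem.Dict String (List String)) :
    (rs.foldl (pvStep p m) d).keys = PySem.Set.update d.keys (rs.filter (fun r => PySem.Str.isIn r p)) := by
  induction rs generalizing d with
  | nil => rw [List.foldl_nil, List.filter_nil, PySem.Set.update_nil]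
  | cons r rest ih =>
    rw [List.foldl_cons, List.filter_cons, ih, pvStep_keys]
    by_cases h : PySem.Str.isIn r p = true
    · rw [if_pos h, if_pos h, PySem.Set.update_cons]
    · rw [if_neg h, if_neg h]

lemma pvInner_getD (rs : List String) (p m : String) (d : PySem.Dict String (List String)) (r : String) :
    (rs.foldl (pvStep p m) d).getD r [] =
      d.getD r [] ++ List.replicate ((rs.filter (fun r' => PySem.Str.isIn r' p)).count r) m := by
  induction rs generalizing d with
  | nil => simp
  | cons r' rest ih =>
    rw [List.foldl_cons, List.filter_cons, ih, pvStep_getD]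
    by_cases h : PySem.Str.isIn r' p = true
    · by_cases he : r = r'
      · subst he
        rw [if_pos ⟨h, rfl⟩, if_pos h, List.count_cons_self, List.replicate_succ,
          List.append_assoc]
        rfl
      · have he' : r' ≠ r := fun hx => he hx.symm
        rw [if_neg (fun hx => he hx.2), if_pos h]
        simp [he']
    · rw [if_neg (fun hx => h hx.1), if_neg h]

lemma pvOuter_keys (regixS : List String) (wLen : Int) (ms : List String) (d : PySem.Dict String (List String)) :
    (ms.foldl (fun d msg => regixS.foldl (pvStep (PySem.Str.slice msg (some 0) (some wLen)) msg) d) d).keys =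
      PySem.Set.update d.keys (ms.flatMap (fun msg => regixS.filter (fun r => PySem.Str.isIn r (PySem.Str.slice msg (some 0) (some wLen))))) := by
  induction ms generalizing d with
  | nil => rw [List.foldl_nil, List.flatMap_nil, PySem.Set.update_nil]
  | cons msg rest ih =>
    rw [List.foldl_cons, List.flatMap_cons, PySem.Set.update_append, ih, pvInner_keys]

lemma pvOuter_getD (regixS : List String) (wLen : Int) (ms : List String) (d : PySem.Dict String (List String)) (r : String) :
    (ms.foldl (fun d msg => regixS.foldl (pvStep (PySem.Str.slice msg (some 0) (some wLen)) msg) d) d).getD r [] =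
      d.getD r [] ++ ms.flatMap (fun msg => List.replicate ((regixS.filter (fun r' => PySem.Str.isIn r' (PySem.Str.slice msg (some 0) (some wLen)))).count r) msg) := by
  induction ms generalizing d with
  | nil => simp
  | cons msg rest ih =>
    rw [List.foldl_cons, List.flatMap_cons, ih, pvInner_getD, List.append_assoc]

-- one message's contribution to the group of key r, as gathered from the hit list
lemma pvGroupMsg (rs : List String) (r m : String) :
    (((rs.map (fun r' => (r', m))).filter (fun rm => rm.1 == r)).map Prod.snd) =
      List.replicate (rs.count r) m := by
  induction rs with
  | nil => rfl
  | cons r' rest ih =>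
    rw [List.map_cons, List.filter_cons, List.count_cons]
    by_cases h : r' = r
    · subst h
      simp [List.replicate_succ, ih]
    · simp [h, ih]

lemma pvFilter_flatMap {α β : Type} (l : List α) (g : α → List β) (q : β → Bool) :
    (l.flatMap g).filter q = l.flatMap (fun x => (g x).filter q) := by
  induction l with
  | nil => rfl
  | cons x xs ih => rw [List.flatMap_cons, List.flatMap_cons, List.filter_append, ih]

-- ===== VERDICT (by name: the statement is the Claim_ definition above) =====
theorem clsMsgsByRegix_spec : Claim_equal_clsMsgsByRegix := by
  intro regixS wLen messages _
  unfold Spec_clsMsgsByRegix clsMsgsByRegix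
  simp only [clsMsgsByRegix_alt]
  have hkeys := pvOuter_keys regixS wLen messages PySem.Dict.empty
  rw [PySem.Dict.keys_empty, PySem.Set.update_nil_left] at hkeys
  have hnodup : (messages.foldl (fun d msg => regixS.foldl (pvStep (PySem.Str.slice msg (some 0) (some wLen)) msg) d) (PySem.Dict.empty : PySem.Dict String (List String))).keys.Nodup := by
    rw [hkeys]; exact PySem.Set.nodup_ofList _
  rw [PySem.Dict.items_eq_map_keys _ hnodup [], hkeys]
  have hmapfst : (messages.flatMap (fun m =>
      (regixS.filter (fun r => PySem.Str.isIn r (PySem.Str.slice m (some 0) (some wLen)))).map (fun r => (r, m)))).map Prod.fst =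
      messages.flatMap (fun msg => regixS.filter (fun r => PySem.Str.isIn r (PySem.Str.slice msg (some 0) (some wLen)))) := by
    rw [List.map_flatMap]
    refine congrArg (fun f => List.flatMap f messages) (funext fun m => ?_)
    rw [List.map_map]
    exact List.map_id'' (fun _ => rfl) _
  have hord : PySem.List.dedup ((messages.flatMap (fun m =>
      (regixS.filter (fun r => PySem.Str.isIn r (PySem.Str.slice m (some 0) (some wLen)))).map (fun r => (r, m)))).map Prod.fst) =
      PySem.Set.ofList (messages.flatMap (fun msg => regixS.filter (fun r => PySem.Str.isIn r (PySem.Str.slice msg (some 0) (some wLen))))) := by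
    rw [hmapfst]; rfl
  rw [hord]
  apply List.map_congr_left
  intro r _
  rw [Prod.mk.injEq]
  refine ⟨rfl, ?_⟩
  rw [pvOuter_getD, PySem.Dict.getD_empty, List.nil_append,
    pvFilter_flatMap, List.map_flatMap]
  exact (congrArg (fun f => List.flatMap f messages) (funext fun m => pvGroupMsg _ r m)).symm
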